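-- pv_equiv track=rewrite | github.com/laurilauter/python_course_2023 | EXAM/exam00/exam.py | rainbows
-- ===== SOURCE A (Python) =====
-- def rainbows(field: str, lower=False) -> int:
--     """
--     Count rainbows.
--
--     #5
--
--     Function has to be recursive.
--
--     assert rainbows("rainbowThisIsJustSomeNoise") == 1  # Lisaks vikerkaarele on veel sümboleid
--     assert rainbows("WoBniar") == 1  # Vikerkaar on tagurpidi ja sisaldab suuri tähti
--     assert rainbows("rainbowobniar") == 1  # Kaks vikerkaart jagavad tähte seega üks neist ei ole valiidne
--
--     :param field: string to search rainbows from
--     :return: number of rainbows in the string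
--     """
--     field = field.lower()
--     count = 0
--     word = "rainbow"
--
--     if word not in field and word[::-1] not in field:
--         return count
--     else:
--         count += 1
--         if word in field:
--             field = field.replace(word,"",1)
--         else:
--             field = field.replace(word[::-1], "", 1)
--         return count + rainbows(field)
-- ===== SOURCE B (Python) =====
-- def rainbows(field: str, lower=False) -> int:
--     """Iterative greedy removal: find leftmost 'rainbow' (preferring it over
--     'wobniar'), splice it out by index, repeat; count the removals."""
--     f = field.lower()
--     count = 0
--     while True:
--         i = f.find("rainbow")
--         if i == -1:
--             i = f.find("wobniar")
--         if i == -1: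
--             return count
--         f = f[:i] + f[i + 7:]
--         count += 1
-- ===== Notes on version B (the rewrite author's own statement) =====
-- stated objective: simpler
-- what changed: Replaces the recursion (which re-lowercases and re-scans with a membership test plus a single-count replace at every level) by a single lowercasing followed by an accumulator while-loop that locates the leftmost occurrence with str.find and splices it out by index slicing.
import Mathlib
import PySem

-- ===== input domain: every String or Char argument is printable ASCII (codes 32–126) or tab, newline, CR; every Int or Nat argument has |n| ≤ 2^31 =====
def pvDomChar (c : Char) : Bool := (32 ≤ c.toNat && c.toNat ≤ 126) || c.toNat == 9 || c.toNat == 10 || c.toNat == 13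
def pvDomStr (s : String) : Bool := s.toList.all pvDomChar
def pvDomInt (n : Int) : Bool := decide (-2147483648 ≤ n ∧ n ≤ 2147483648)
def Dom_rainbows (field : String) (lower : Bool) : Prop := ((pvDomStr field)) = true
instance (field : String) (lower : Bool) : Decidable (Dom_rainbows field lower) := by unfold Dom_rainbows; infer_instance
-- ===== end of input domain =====

-- B replaces A's recursion (re-lowercase + membership test + replace(...,1) each level) by one
-- lowercasing and an accumulator loop locating the leftmost occurrence with find and index slicing.


-- ===== PORT A =====
def pvWordL : List Char := "rainbow".toList
def pvWordR : List Char := "wobniar".toList   -- word[::-1]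

-- if s.find(sub) succeeds and sub has length 7, the occurrence fits inside s
theorem find_bound7 (f sub : List Char) (h7 : sub.length = 7)
    (hne : PySem.Chars.find f sub ≠ -1) :
    0 ≤ PySem.Chars.find f sub ∧ (PySem.Chars.find f sub).toNat + 7 ≤ f.length := by
  have h0 : 0 ≤ PySem.Chars.find f sub := by
    have := PySem.Chars.neg_one_le_find f sub; omega
  have h1 := (PySem.Chars.find_spec h0).1.length_le
  rw [List.length_drop, h7] at h1
  exact ⟨h0, by omega⟩

-- hand port of s.replace(old, "", 1) (PySem.Chars.replace has no maxcount argument):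
-- remove the leftmost occurrence of old, if any; exact for new = "" and count = 1.
def pvReplaceOne (s old : List Char) : List Char :=
  let i := PySem.Chars.find s old
  if i = -1 then s else s.take i.toNat ++ s.drop (i.toNat + old.length)

-- termination lemma for port A, cited by its decreasing_by
theorem pvReplaceOne_length_lt (s old : List Char) (h7 : old.length = 7)
    (hin : PySem.Chars.isIn old s = true) : (pvReplaceOne s old).length < s.length := by
  have hne1 : PySem.Chars.find s old ≠ -1 := by
    rw [ne_eq, PySem.Chars.find_eq_neg_one_iff]
    exact not_not_intro ((PySem.Chars.isIn_iff_infix old s).mp hin)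
  obtain ⟨h0, hb⟩ := find_bound7 s old h7 hne1
  unfold pvReplaceOne
  simp only [hne1, if_false, List.length_append, List.length_take, List.length_drop, h7]
  omega

def rainbowsGo (s : List Char) : Int :=
  let f := PySem.Chars.lower s
  if h : PySem.Chars.isIn pvWordL f = false ∧ PySem.Chars.isIn pvWordR f = false then
    0
  else
    let f' := if PySem.Chars.isIn pvWordL f then pvReplaceOne f pvWordL
              else pvReplaceOne f pvWordR
    1 + rainbowsGo f'
termination_by s.length
decreasing_by
  have hlenf : (PySem.Chars.lower s).length = s.length := by
    simp [PySem.Chars.lower]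
  by_cases hw : PySem.Chars.isIn pvWordL (PySem.Chars.lower s) = true
  · rw [dif_pos hw]
    have := pvReplaceOne_length_lt (PySem.Chars.lower s) pvWordL (by decide) hw
    omega
  · have hw' : PySem.Chars.isIn pvWordL (PySem.Chars.lower s) = false := by
      simpa using hw
    have hr : PySem.Chars.isIn pvWordR (PySem.Chars.lower s) = true := by
      rcases Bool.eq_false_or_eq_true (PySem.Chars.isIn pvWordR (PySem.Chars.lower s)) with h1 | h1
      · exact h1
      · exact absurd ⟨hw', h1⟩ h
    rw [dif_neg hw]
    have := pvReplaceOne_length_lt (PySem.Chars.lower s) pvWordR (by decide) hr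
    omega

def rainbows (field : String) (lower : Bool) : Int :=
  rainbowsGo field.toList

-- ===== PORT B =====
-- i = f.find("rainbow"); if i == -1: i = f.find("wobniar")
def pvPick (f : List Char) : Int :=
  if PySem.Chars.find f pvWordL = -1 then PySem.Chars.find f pvWordR
  else PySem.Chars.find f pvWordL

-- termination lemma for port B, cited by its decreasing_by
theorem pvPick_splice_length_lt (f : List Char) (h : pvPick f ≠ -1) :
    (PySem.List.slice f none (some (pvPick f)) ++
      PySem.List.slice f (some (pvPick f + 7)) none).length < f.length := by
  have hb : 0 ≤ pvPick f ∧ (pvPick f).toNat + 7 ≤ f.length := by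
    unfold pvPick at h ⊢
    by_cases hw : PySem.Chars.find f pvWordL = -1
    · simp only [hw, if_true] at h ⊢
      exact find_bound7 f pvWordR (by decide) h
    · simp only [hw, if_false] at h ⊢
      exact find_bound7 f pvWordL (by decide) hw
  obtain ⟨h0, hbound⟩ := hb
  rw [PySem.List.slice_to f h0, PySem.List.slice_from f (by omega : (0:Int) ≤ pvPick f + 7)]
  simp only [List.length_append, List.length_take, List.length_drop]
  have h7 : (pvPick f + 7).toNat = (pvPick f).toNat + 7 := by omega
  omega

def rainbowsAltGo (f : List Char) (count : Int) : Int :=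
  let i := pvPick f
  if h : i = -1 then count
  else
    rainbowsAltGo (PySem.List.slice f none (some i) ++ PySem.List.slice f (some (i + 7)) none)
      (count + 1)
termination_by f.length
decreasing_by
  exact pvPick_splice_length_lt f h

def rainbows_alt (field : String) (lower : Bool) : Int :=
  rainbowsAltGo (PySem.Chars.lower field.toList) 0

-- ===== PRECONDITION & SPEC =====
def Spec_rainbows (field : String) (lower : Bool) (out : Int) : Prop := out = rainbows_alt field lower
instance (field : String) (lower : Bool) (out : Int) : Decidable (Spec_rainbows field lower out) := by unfold Spec_rainbows; infer_instance

-- ===== CLAIM (what is proved, stated in full; the proofs are below) =====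
def Claim_equal_rainbows : Prop := ∀ (field : String) (lower : Bool), Dom_rainbows field lower → Spec_rainbows field lower (rainbows field lower)

-- ===== LEMMAS AND PROOFS =====
theorem lowerChar_idem (c : Char) :
    PySem.Chars.lowerChar (PySem.Chars.lowerChar c) = PySem.Chars.lowerChar c := by
  unfold PySem.Chars.lowerChar PySem.Chars.isupper
  by_cases h : 'A' ≤ c ∧ c ≤ 'Z'
  · have hA : c.toNat ≥ 65 := h.1
    have hZ : c.toNat ≤ 90 := h.2
    have ht : (Char.ofNat (c.toNat + 32)).toNat = c.toNat + 32 := by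
      have hv : Nat.isValidChar (c.toNat + 32) := Or.inl (by omega)
      simp [Char.toNat_ofNat, hv]
    simp only [h.1, h.2, decide_true, Bool.and_self, if_true]
    have hnle : ¬ (Char.ofNat (c.toNat + 32) ≤ 'Z') := by
      intro hle
      have h2 : (Char.ofNat (c.toNat + 32)).toNat ≤ (('Z' : Char)).toNat :=
        Fin.mk_le_mk.mp (Char.le_def.mp hle)
      rw [ht] at h2
      have hZ90 : (('Z' : Char)).toNat = 90 := by decide
      omega
    simp [hnle]
  · have hf : (decide ('A' ≤ c) && decide (c ≤ 'Z')) = false := by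
      rcases not_and_or.mp h with h1 | h1 <;> simp [h1]
    simp [hf]

theorem lower_idem (s : List Char) :
    PySem.Chars.lower (PySem.Chars.lower s) = PySem.Chars.lower s := by
  simp [PySem.Chars.lower, List.map_map, Function.comp_def, lowerChar_idem]

theorem lower_fixed_splice (f : List Char) (hf : PySem.Chars.lower f = f) (a b : Nat) :
    PySem.Chars.lower (f.take a ++ f.drop b) = f.take a ++ f.drop b := by
  simp only [PySem.Chars.lower, List.map_append, List.map_take, List.map_drop]
  rw [show f.map PySem.Chars.lowerChar = PySem.Chars.lower f from rfl, hf]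

theorem splice_slice_eq (f : List Char) (i : Int) (h0 : 0 ≤ i) :
    PySem.List.slice f none (some i) ++ PySem.List.slice f (some (i + 7)) none
      = f.take i.toNat ++ f.drop (i.toNat + 7) := by
  rw [PySem.List.slice_to f h0, PySem.List.slice_from f (by omega : (0:Int) ≤ i + 7)]
  rw [show (i + 7).toNat = i.toNat + 7 by omega]

theorem not_isIn_find_eq_neg_one (f sub : List Char)
    (h : PySem.Chars.isIn sub f = false) : PySem.Chars.find f sub = -1 := by
  rw [PySem.Chars.find_eq_neg_one_iff]
  intro hinf
  rw [(PySem.Chars.isIn_iff_infix _ _).mpr hinf] at h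
  exact absurd h (by simp)

theorem isIn_find_ne_neg_one (f sub : List Char)
    (h : PySem.Chars.isIn sub f = true) : PySem.Chars.find f sub ≠ -1 := by
  rw [ne_eq, PySem.Chars.find_eq_neg_one_iff]
  exact not_not_intro ((PySem.Chars.isIn_iff_infix _ _).mp h)

theorem go_eq (n : Nat) (f : List Char) (hn : f.length ≤ n)
    (hf : PySem.Chars.lower f = f) (c : Int) :
    rainbowsAltGo f c = c + rainbowsGo f := by
  induction n generalizing f c with
  | zero =>
    have hfe : f = [] := List.eq_nil_of_length_eq_zero (by omega)
    subst hfe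
    rw [rainbowsAltGo.eq_def, rainbowsGo.eq_def]
    simp [pvPick, show PySem.Chars.find [] pvWordL = -1 from by decide,
      show PySem.Chars.find [] pvWordR = -1 from by decide,
      show PySem.Chars.isIn pvWordL (PySem.Chars.lower []) = false from by decide,
      show PySem.Chars.isIn pvWordR (PySem.Chars.lower []) = false from by decide]
  | succ n ih =>
    rw [rainbowsAltGo.eq_def, rainbowsGo.eq_def]
    simp only [hf]
    by_cases hw : PySem.Chars.isIn pvWordL f = true
    · -- rainbow present: both remove the leftmost rainbow
      have hne1 := isIn_find_ne_neg_one f pvWordL hw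
      obtain ⟨h0, hbound⟩ := find_bound7 f pvWordL (by decide) hne1
      have hpick : pvPick f = PySem.Chars.find f pvWordL := by
        unfold pvPick; simp [hne1]
      have hcond : ¬ (PySem.Chars.isIn pvWordL f = false ∧ PySem.Chars.isIn pvWordR f = false) := by
        simp [hw]
      rw [dif_neg (by rw [hpick]; exact hne1), dif_neg hcond, if_pos hw]
      rw [hpick, splice_slice_eq f _ h0]
      have hrepl : pvReplaceOne f pvWordL
          = f.take (PySem.Chars.find f pvWordL).toNat
            ++ f.drop ((PySem.Chars.find f pvWordL).toNat + 7) := by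
        unfold pvReplaceOne
        simp only [hne1, if_false]
        rw [show pvWordL.length = 7 from by decide]
      rw [hrepl]
      have hf' := lower_fixed_splice f hf (PySem.Chars.find f pvWordL).toNat
        ((PySem.Chars.find f pvWordL).toNat + 7)
      have hlen' : (f.take (PySem.Chars.find f pvWordL).toNat
          ++ f.drop ((PySem.Chars.find f pvWordL).toNat + 7)).length ≤ n := by
        simp only [List.length_append, List.length_take, List.length_drop]
        omega
      rw [ih _ hlen' hf' (c + 1)]
      ring
    · have hwf : PySem.Chars.isIn pvWordL f = false := by simpa using hw
      have hfind1 := not_isIn_find_eq_neg_one f pvWordL hwf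
      have hpick : pvPick f = PySem.Chars.find f pvWordR := by
        unfold pvPick; simp [hfind1]
      by_cases hr : PySem.Chars.isIn pvWordR f = true
      · -- only the reversed word present
        have hne1 := isIn_find_ne_neg_one f pvWordR hr
        obtain ⟨h0, hbound⟩ := find_bound7 f pvWordR (by decide) hne1
        have hcond : ¬ (PySem.Chars.isIn pvWordL f = false ∧ PySem.Chars.isIn pvWordR f = false) := by
          simp [hr]
        rw [dif_neg (by rw [hpick]; exact hne1), dif_neg hcond, if_neg (by simp [hwf])]
        rw [hpick, splice_slice_eq f _ h0]
        have hrepl : pvReplaceOne f pvWordR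
            = f.take (PySem.Chars.find f pvWordR).toNat
              ++ f.drop ((PySem.Chars.find f pvWordR).toNat + 7) := by
          unfold pvReplaceOne
          simp only [hne1, if_false]
          rw [show pvWordR.length = 7 from by decide]
        rw [hrepl]
        have hf' := lower_fixed_splice f hf (PySem.Chars.find f pvWordR).toNat
          ((PySem.Chars.find f pvWordR).toNat + 7)
        have hlen' : (f.take (PySem.Chars.find f pvWordR).toNat
            ++ f.drop ((PySem.Chars.find f pvWordR).toNat + 7)).length ≤ n := by
          simp only [List.length_append, List.length_take, List.length_drop]
          omega
        rw [ih _ hlen' hf' (c + 1)]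
        ring
      · -- neither word present: both stop
        have hrf : PySem.Chars.isIn pvWordR f = false := by simpa using hr
        have hfind2 := not_isIn_find_eq_neg_one f pvWordR hrf
        rw [dif_pos (by rw [hpick]; exact hfind2), dif_pos ⟨hwf, hrf⟩]
        ring

theorem rainbowsGo_lower (s : List Char) :
    rainbowsGo (PySem.Chars.lower s) = rainbowsGo s := by
  rw [rainbowsGo.eq_def, rainbowsGo.eq_def]
  simp only [lower_idem]

-- ===== VERDICT (by name: the statement is the Claim_ definition above) =====
theorem rainbows_spec : Claim_equal_rainbows := by
  intro field lower _
  unfold Spec_rainbows rainbows rainbows_alt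
  rw [go_eq (PySem.Chars.lower field.toList).length _ le_rfl
      (lower_idem field.toList) 0, rainbowsGo_lower]
  ring
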